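-- pv_equiv track=rewrite | github.com/Olujare-Dada/Jobsite_Scraping | jobberman_machines_test.py | _batch_maker
-- ===== SOURCE A (Python) =====
-- def _batch_maker(number, value):
--     """
--     Divide a number into batches of a specified size.
--
--     Args:
--         number (int): Total number to be divided.
--         value (int): Size of each batch.
--
--     Returns:
--         list of tuples: List of tuples representing batch ranges.
--     """
--
--     if value >= number:
--         return [(0, number), (number, number)]
--
--     quotient, remainder = divmod(number, value)
--     result = [value] * quotient
--     if remainder > 0:
--         result.append(remainder)
--
--     cumulative_sum_list = []
--     cumulative_sum = 0
--
--     for num in result: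
--         cumulative_sum += num
--         cumulative_sum_list.append(cumulative_sum)
--
--     cumulative_sum_list.insert(0, 0)  # Insert 0 at the beginning
--
--     tuple_list = [(cumulative_sum_list[i], cumulative_sum_list[i + 1]) for i in range(len(cumulative_sum_list) - 1)]
--
--     return tuple_list
-- ===== SOURCE B (Python) =====
-- def _batch_maker(number, value):
--     if value >= number:
--         return [(0, number), (number, number)]
--     quotient, remainder = divmod(number, value)
--     result = [(i * value, (i + 1) * value) for i in range(quotient)]
--     if remainder > 0:
--         result.append((quotient * value, number))
--     return result
-- ===== Notes on version B (the rewrite author's own statement) =====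
-- stated objective: simpler
-- what changed: Replaces the sizes list, cumulative-sum accumulator loop and indexed zip with a single comprehension computing each batch tuple in closed form from its index, plus one conditional append for the remainder.
import Mathlib
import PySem

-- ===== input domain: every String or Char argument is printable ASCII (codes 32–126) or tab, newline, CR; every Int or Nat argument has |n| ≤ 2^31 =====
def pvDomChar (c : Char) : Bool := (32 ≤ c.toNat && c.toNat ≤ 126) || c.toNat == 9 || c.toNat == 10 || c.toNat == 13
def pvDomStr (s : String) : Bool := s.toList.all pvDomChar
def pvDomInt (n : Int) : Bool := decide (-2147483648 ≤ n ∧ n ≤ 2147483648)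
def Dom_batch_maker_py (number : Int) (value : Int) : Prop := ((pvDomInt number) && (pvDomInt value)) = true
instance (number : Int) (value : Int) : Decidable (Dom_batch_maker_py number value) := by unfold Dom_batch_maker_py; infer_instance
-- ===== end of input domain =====

-- B replaces A's sizes list + cumulative-sum loop + indexed zip by one comprehension
-- computing each batch tuple in closed form from its index (objective: simpler).

-- ===== PORT A =====
def batch_maker_py (number : Int) (value : Int) : List (Int × Int) :=
  if value ≥ number then [(0, number), (number, number)]
  else
    match PySem.Int.divmod? number value with
    | none => []  -- ZeroDivisionError; excluded by Pre_
    | some (quotient, remainder) =>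
      let result : List Int := List.replicate quotient.toNat value
      let result : List Int := if remainder > 0 then result ++ [remainder] else result
      let st := result.foldl
        (fun (st : Int × List Int) num => (st.1 + num, st.2 ++ [st.1 + num])) (0, [])
      let cumulative_sum_list : List Int := 0 :: st.2
      (List.range (cumulative_sum_list.length - 1)).map
        (fun i => (cumulative_sum_list.getD i 0, cumulative_sum_list.getD (i + 1) 0))

-- ===== PORT B =====
def batch_maker_py_alt (number : Int) (value : Int) : List (Int × Int) :=
  if value ≥ number then [(0, number), (number, number)]
  else
    match PySem.Int.divmod? number value with
    | none => []  -- ZeroDivisionError; excluded by Pre_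
    | some (quotient, remainder) =>
      let result := (PySem.List.pyRange 0 quotient 1).map
        (fun i => (i * value, (i + 1) * value))
      if remainder > 0 then result ++ [(quotient * value, number)] else result

-- ===== PRECONDITION & SPEC =====
-- A (and B) raise ZeroDivisionError exactly when value = 0 and value < number.
def Pre_batch_maker_py (number : Int) (value : Int) : Prop := ¬(value = 0 ∧ value < number)
instance (number : Int) (value : Int) : Decidable (Pre_batch_maker_py number value) := by
  unfold Pre_batch_maker_py; infer_instance
def pvWitness_batch_maker_py : Int × Int := (10, 3)

def Spec_batch_maker_py (number : Int) (value : Int) (out : List (Int × Int)) : Prop := out = batch_maker_py_alt number value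
instance (number : Int) (value : Int) (out : List (Int × Int)) : Decidable (Spec_batch_maker_py number value out) := by unfold Spec_batch_maker_py; infer_instance

-- ===== CLAIM (what is proved, stated in full; the proofs are below) =====
def Claim_equal_batch_maker_py : Prop := ∀ (number : Int) (value : Int), Dom_batch_maker_py number value → Pre_batch_maker_py number value → Spec_batch_maker_py number value (batch_maker_py number value)

-- ===== LEMMAS AND PROOFS =====

-- prefix sums of a list starting from s
def pvPS (s : Int) : List Int → List Int
  | [] => []
  | x :: t => (s + x) :: pvPS (s + x) t

theorem pvFoldl_cum (l : List Int) (s : Int) (acc : List Int) :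
    l.foldl (fun (st : Int × List Int) num => (st.1 + num, st.2 ++ [st.1 + num])) (s, acc)
      = (s + l.sum, acc ++ pvPS s l) := by
  induction l generalizing s acc with
  | nil => simp [pvPS]
  | cons x t ih => simp [pvPS, ih, List.sum_cons, add_assoc]

-- step pairs: the batch tuples generated by walking a list of batch sizes
def pvStep (s : Int) (l : List Int) : List (Int × Int) :=
  l.foldr (fun x (k : Int → List (Int × Int)) s => (s, s + x) :: k (s + x)) (fun _ => []) s

-- adjacency pairs by indexing = zip with tail
theorem pvPairsIdx (a : Int) (l : List Int) :
    (List.range ((a :: l).length - 1)).map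
        (fun i => ((a :: l).getD i 0, (a :: l).getD (i + 1) 0))
      = (a :: l).zip l := by
  induction l generalizing a with
  | nil => simp
  | cons b t ih =>
    have h : (List.range ((a :: b :: t).length - 1))
        = 0 :: (List.range ((b :: t).length - 1)).map Nat.succ := by
      simp [List.range_succ_eq_map]
    rw [h, List.map_cons, List.map_map, List.zip_cons_cons]
    congr 1
    rw [← ih b]
    apply List.map_congr_left
    intro i _
    simp [List.getD]

-- zip of cumulative sums with their tail = step pairs
theorem pvZipPS (s : Int) (l : List Int) :
    (s :: pvPS s l).zip (pvPS s l) = pvStep s l := by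
  induction l generalizing s with
  | nil => simp [pvPS, pvStep]
  | cons x t ih =>
    simp only [pvPS, pvStep, List.foldr_cons, List.zip_cons_cons] at *
    rw [ih]

theorem pvStep_append (s : Int) (l1 l2 : List Int) :
    pvStep s (l1 ++ l2) = pvStep s l1 ++ pvStep (s + l1.sum) l2 := by
  induction l1 generalizing s with
  | nil => simp [pvStep]
  | cons x t ih =>
    simp only [pvStep, List.foldr_cons, List.cons_append, List.sum_cons] at *
    rw [ih, add_assoc]

theorem pvStep_replicate (n : Nat) (v : Int) :
    pvStep 0 (List.replicate n v)
      = (List.range n).map (fun i : Nat => ((i : Int) * v, ((i : Int) + 1) * v)) := by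
  suffices h : ∀ (n : Nat) (s : Int), pvStep s (List.replicate n v)
      = (List.range n).map (fun i : Nat => (s + (i : Int) * v, s + ((i : Int) + 1) * v)) by
    simpa using h n 0
  intro n
  induction n with
  | zero => intro s; simp [pvStep]
  | succ m ih =>
    intro s
    rw [List.replicate_succ, List.range_succ_eq_map, List.map_cons, List.map_map]
    show (s, s + v) :: pvStep (s + v) (List.replicate m v) = _
    rw [ih (s + v)]
    congr 1
    · norm_num
    apply List.map_congr_left
    intro i _
    simp only [Function.comp_apply, Prod.mk.injEq]
    push_cast
    constructor <;> ring

theorem pvStep_sing (s r : Int) : pvStep s [r] = [(s, s + r)] := by simp [pvStep]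

theorem pv_main (number value : Int) (hlt : ¬ value ≥ number) (hv : value ≠ 0) :
    batch_maker_py number value = batch_maker_py_alt number value := by
  have hdm : PySem.Int.divmod? number value
      = some (PySem.Int.floordiv number value, PySem.Int.mod number value) := by
    simp [PySem.Int.divmod?, PySem.Int.floordiv, PySem.Int.mod, hv]
  set q := PySem.Int.floordiv number value with hqdef
  set r := PySem.Int.mod number value with hrdef
  have hnum : q * value + r = number := PySem.Int.floordiv_mul_add_mod number value
  unfold batch_maker_py batch_maker_py_alt
  rw [if_neg hlt, if_neg hlt, hdm]
  simp only [pvFoldl_cum, List.nil_append, PySem.List.pyRange_one, sub_zero]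
  by_cases hr : r > 0
  · have hq : 0 ≤ q := by
      rcases lt_or_gt_of_ne hv with hvneg | hvpos
      · have := PySem.Int.mod_neg_bounds number hvneg
        rw [← hrdef] at this; omega
      · have hrlt : r < value := PySem.Int.mod_lt number hvpos
        nlinarith
    rw [if_pos hr, if_pos hr, pvPairsIdx, pvZipPS, pvStep_append, pvStep_replicate,
        List.sum_replicate, pvStep_sing]
    congr 1
    · rw [List.map_map]
      apply List.map_congr_left
      intro i _
      simp only [Function.comp_apply, Prod.mk.injEq]
      constructor <;> ring
    · have hcast : ((q.toNat : Int)) = q := Int.toNat_of_nonneg hq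
      simp only [zero_add, nsmul_eq_mul, hcast]
      rw [hnum]
  · rw [if_neg hr, if_neg hr, pvPairsIdx, pvZipPS, pvStep_replicate, List.map_map]
    apply List.map_congr_left
    intro i _
    simp only [Function.comp_apply, Prod.mk.injEq]
    constructor <;> ring

-- ===== VERDICT (by name: the statement is the Claim_ definition above) =====
theorem batch_maker_py_spec : Claim_equal_batch_maker_py := by
  intro number value _ hpre
  unfold Spec_batch_maker_py
  by_cases hge : value ≥ number
  · unfold batch_maker_py batch_maker_py_alt
    rw [if_pos hge, if_pos hge]
  · have hv : value ≠ 0 := fun h => hpre ⟨h, by omega⟩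
    exact pv_main number value hge hv
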